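-- pv_equiv track=rewrite | github.com/jaalonso/Exercitium-Python | src/Iguales_al_siguiente.py | igualesAlSiguiente3
-- ===== SOURCE A (Python) =====
-- from typing import TypeVar
--
-- A = TypeVar('A')
--
-- def igualesAlSiguiente3(xs: list[A]) -> list[A]:
--     ys = []
--     i = 0
--     while i < len(xs) - 1:
--         if xs[i] == xs[i+1]:
--             ys.append(xs[i])
--         i += 1
--     return ys
-- ===== SOURCE B (Python) =====
-- from itertools import groupby
--
-- def igualesAlSiguiente3(xs):
--     ys = []
--     for _, g in groupby(xs):
--         ys.extend(list(g)[:-1])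
--     return ys
-- ===== Notes on version B (the rewrite author's own statement) =====
-- stated objective: idiomatic
-- what changed: B splits the list into maximal runs of equal consecutive elements with itertools.groupby and emits each run minus its last element, instead of A's index loop comparing each element with its successor.
import Mathlib
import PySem

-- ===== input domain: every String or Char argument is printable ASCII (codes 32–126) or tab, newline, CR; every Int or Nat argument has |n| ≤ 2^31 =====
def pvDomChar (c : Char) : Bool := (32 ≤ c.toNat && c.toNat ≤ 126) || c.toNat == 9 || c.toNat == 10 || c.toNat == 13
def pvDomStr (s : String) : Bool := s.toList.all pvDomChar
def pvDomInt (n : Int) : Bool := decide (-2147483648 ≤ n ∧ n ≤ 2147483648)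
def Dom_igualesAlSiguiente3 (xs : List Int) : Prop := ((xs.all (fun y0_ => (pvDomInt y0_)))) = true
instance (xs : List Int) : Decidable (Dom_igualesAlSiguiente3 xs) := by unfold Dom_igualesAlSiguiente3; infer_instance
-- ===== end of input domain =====

-- B groups the list into maximal runs of equal consecutive elements (itertools.groupby) and
-- emits each run minus its last element, instead of A's index loop comparing xs[i] with xs[i+1];
-- objective: idiomatic.

-- ===== PORT A =====
-- A's while loop, recursion on the index i (i starts at 0 and only increases, so i : Nat);
-- pyGet? is always `some` when appended (i + 1 < len), so `.getD 0` is exact there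
def pvALoop (xs : List Int) (ys : List Int) (i : Nat) : List Int :=
  if h : (i : Int) < (xs.length : Int) - 1 then
    pvALoop xs
      (if PySem.List.pyGet? xs (i : Int) = PySem.List.pyGet? xs ((i : Int) + 1)
       then ys ++ [(PySem.List.pyGet? xs (i : Int)).getD 0] else ys)
      (i + 1)
  else ys
termination_by xs.length - i
decreasing_by omega

def igualesAlSiguiente3 (xs : List Int) : List Int := pvALoop xs [] 0

-- ===== PORT B =====
-- itertools.groupby(xs): the list of maximal runs of consecutive equal elements
def pvGroupRuns : List Int → List (List Int)
  | [] => []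
  | x :: xs =>
    match pvGroupRuns xs with
    | [] => [[x]]
    | [] :: rest => [x] :: [] :: rest   -- unreachable: runs are nonempty
    | (y :: r) :: rest =>
      if x = y then (x :: y :: r) :: rest else [x] :: (y :: r) :: rest

-- 'ys.extend(list(g)[:-1])' for each run g
def igualesAlSiguiente3_alt (xs : List Int) : List Int :=
  (pvGroupRuns xs).foldl (fun ys g => ys ++ g.dropLast) []

-- ===== PRECONDITION & SPEC =====
def Spec_igualesAlSiguiente3 (xs : List Int) (out : List Int) : Prop := out = igualesAlSiguiente3_alt xs
instance (xs : List Int) (out : List Int) : Decidable (Spec_igualesAlSiguiente3 xs out) := by unfold Spec_igualesAlSiguiente3; infer_instance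

-- ===== CLAIM (what is proved, stated in full; the proofs are below) =====
def Claim_equal_igualesAlSiguiente3 : Prop := ∀ (xs : List Int), Dom_igualesAlSiguiente3 xs → Spec_igualesAlSiguiente3 xs (igualesAlSiguiente3 xs)

-- ===== LEMMAS AND PROOFS =====

-- the common reference function: elements equal to their successor, by structural recursion
def pvAdj : List Int → List Int
  | x :: y :: t => if x = y then x :: pvAdj (y :: t) else pvAdj (y :: t)
  | _ => []

-- ---- A-side: pvALoop computes pvAdj of the remaining suffix ----

lemma pvALoop_acc (xs ys : List Int) (i : Nat) :
    pvALoop xs ys i = ys ++ pvALoop xs [] i := by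
  induction hn : xs.length - i generalizing ys i with
  | zero =>
    have h : ¬ ((i : Int) < (xs.length : Int) - 1) := by omega
    rw [pvALoop]
    conv_rhs => rw [pvALoop]
    simp [h]
  | succ n ih =>
    rw [pvALoop]
    conv_rhs => rw [pvALoop]
    by_cases h : (i : Int) < (xs.length : Int) - 1
    · simp only [h, dite_true]
      have hn' : xs.length - (i + 1) = n := by omega
      rw [ih _ _ hn']
      conv_rhs => rw [ih _ _ hn']
      split_ifs <;> simp
    · simp [h]

lemma pvAdj_short (l : List Int) (h : l.length ≤ 1) : pvAdj l = [] := by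
  match l, h with
  | [], _ => rfl
  | [a], _ => rfl

lemma pvALoop_drop (xs : List Int) (i : Nat) :
    pvALoop xs [] i = pvAdj (xs.drop i) := by
  induction hn : xs.length - i generalizing i with
  | zero =>
    rw [pvALoop]
    have h : ¬ ((i : Int) < (xs.length : Int) - 1) := by omega
    rw [pvAdj_short _ (by simp; omega)]
    simp [h]
  | succ n ih =>
    rw [pvALoop]
    by_cases h : (i : Int) < (xs.length : Int) - 1
    · have hi : i < xs.length := by omega
      have hi1 : i + 1 < xs.length := by omega
      have hg1 : PySem.List.pyGet? xs (i : Int) = some xs[i] :=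
        PySem.List.pyGet?_ofNat xs i hi
      have hg2 : PySem.List.pyGet? xs ((i : Int) + 1) = some xs[i+1] := by
        have : ((i : Int) + 1) = ((i + 1 : Nat) : Int) := by push_cast; ring
        rw [this]; exact PySem.List.pyGet?_ofNat xs (i+1) hi1
      have hdrop : xs.drop i = xs[i] :: xs.drop (i + 1) :=
        (List.getElem_cons_drop hi).symm
      have hdrop1 : xs.drop (i + 1) = xs[i+1] :: xs.drop (i + 2) :=
        (List.getElem_cons_drop hi1).symm
      simp only [h, dite_true]
      rw [pvALoop_acc, ih (i + 1) (by omega), hdrop, hdrop1, pvAdj, hg1, hg2]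
      by_cases he : xs[i] = xs[i+1] <;> simp [he, ← hdrop1]
    · rw [pvAdj_short _ (by simp; omega)]
      simp [h]

-- ---- B-side: the first run of pvGroupRuns (y :: t) starts with y ----

lemma pvGroupRuns_head : ∀ (t : List Int) (y : Int),
    ∃ r rest, pvGroupRuns (y :: t) = (y :: r) :: rest := by
  intro t
  induction t with
  | nil => exact fun y => ⟨[], [], rfl⟩
  | cons z t ih =>
    intro y
    obtain ⟨r, rest, h⟩ := ih z
    by_cases he : y = z
    · exact ⟨z :: r, rest, by rw [pvGroupRuns, h]; simp [he]⟩
    · exact ⟨[], (z :: r) :: rest, by rw [pvGroupRuns, h]; simp [he]⟩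

lemma pvGroupRuns_flat (xs : List Int) :
    (pvGroupRuns xs).flatMap List.dropLast = pvAdj xs := by
  induction xs with
  | nil => rfl
  | cons x xs ih =>
    match xs with
    | [] => rfl
    | y :: t =>
      obtain ⟨r, rest, h⟩ := pvGroupRuns_head t y
      rw [h] at ih
      rw [pvGroupRuns, h, pvAdj]
      by_cases he : x = y
      · simp only [he, if_true]
        rw [← ih]
        simp
      · simp only [he, if_false]
        rw [← ih]
        simp

-- ===== VERDICT (by name: the statement is the Claim_ definition above) =====
theorem igualesAlSiguiente3_spec : Claim_equal_igualesAlSiguiente3 := by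
  intro xs _
  unfold Spec_igualesAlSiguiente3 igualesAlSiguiente3 igualesAlSiguiente3_alt
  rw [PySem.List.foldl_append_eq_flatMap, pvGroupRuns_flat, pvALoop_drop]
  simp
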